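-- pv_equiv track=rewrite | github.com/texlnghorn/RealWorkLabsPython | animate_particles.py | animate
-- ===== SOURCE A (Python) =====
-- def particle_string(input_arr):
--     output = ""
--     for sub_arr in input_arr:
--         if "R" in sub_arr or "L" in sub_arr:
--             output += "X"
--         else:
--             output += "."
--     return output
--
-- def animate(initial_position, speed):
--     # A string array to store the steps of the particle animation.
--     steps = []
--
--     # current position is a 2-dimensional array of particle positions in the chamber.
--     # Each inner array represents all the particles at a single position in the chamber.
--     # Example: [['R'], [], ['L', 'R']] means 'R' at index 0, no particles at index 1, 'L' and 'R' at index 2.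
--     current_position = []
--
--     # Initialize currentPosition based on initialPosition.
--     # Each element of initialPosition becomes a sub-array in currentPosition.
--     # If initialPosition[i] is 'R', then currentPosition[i] becomes ['R'].
--     # If initialPosition[i] is 'L', then currentPosition[i] becomes ['L'].
--     # If initialPosition[i] is '', then currentPosition[i] becomes [''].
--     for direction in initial_position:
--         current_position.append([direction])
--
--     # Convert the initial 2D position array to a particle string representation.
--     particle_str = particle_string(current_position)
--
--     # Continue to evaluate the particle positions until all particles have exited the chamber.
--     # 'X' in particle_str indicates there are still active particles in the chamber.
--     while "X" in particle_str:
--         # Add the current particle string to the steps array.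
--         steps.append(particle_str)
--
--         # Initialize a new 2D array to store the particle positions for the next step.
--         # It's pre-filled with empty arrays for each potential position.
--         next_position = []
--         for i in range(len(initial_position)):
--             next_position.append([])
--
--         # Iterate through the current particle positions to determine their next positions.
--         for i, particles in enumerate(current_position):
--             for particle in particles:
--                 # If the particle is moving Right, calculate its next index.
--                 if particle == "R":
--                     # Check if the particle stays within the bounds of the chamber.
--                     if i + speed <= len(initial_position) - 1:
--                         next_position[i + speed].append("R")
--                 # If the particle is moving Left, calculate its next index.
--                 elif particle == "L":
--                     # Check if the particle stays within the bounds of the chamber.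
--                     if i - speed >= 0:
--                         next_position[i - speed].append("L")
--                 # Particles that have moved out of bounds are naturally excluded from nextPosition.
--
--         # Reset the current position to be the calculated next position for the next iteration.
--         current_position = next_position
--         # Update the particle string representation for the new current position.
--         particle_str = particle_string(current_position)
--     steps.append(particle_str)
--     return steps
-- ===== SOURCE B (Python) =====
-- def animate(initial_position, speed):
--     # Closed-form per-step occupancy from the original source positions,
--     # instead of simulating a 2D list-of-lists chamber state.
--     n = len(initial_position)
--     rs = [i for i, d in enumerate(initial_position) if d == "R"]
--     ls = [i for i, d in enumerate(initial_position) if d == "L"]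
--     steps = []
--     t = 0
--     while True:
--         occupied = set()
--         for i in rs:
--             p = i + t * speed
--             if 0 <= p <= n - 1:
--                 occupied.add(p)
--         for i in ls:
--             p = i - t * speed
--             if 0 <= p <= n - 1:
--                 occupied.add(p)
--         s = "".join("X" if j in occupied else "." for j in range(n))
--         steps.append(s)
--         if "X" not in s:
--             return steps
--         t += 1
-- ===== Notes on version B (the rewrite author's own statement) =====
-- stated objective: simpler
-- what changed: B replaces A's step-by-step simulation of a 2D list-of-lists chamber state with a per-step closed-form occupancy computed directly from the original 'R'/'L' source positions (i +/- t*speed), emitting each step's string from scratch.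
-- crash fix: For speed <= -1 with an 'L' present, or an 'R' present and len(initial_position) < -speed, A eventually raises IndexError (an out-of-range append index); B returns the finite list of steps until the chamber is empty. — e.g. on animate(["L"], -1): A raises IndexError, B returns ["X", "."]
import Mathlib
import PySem

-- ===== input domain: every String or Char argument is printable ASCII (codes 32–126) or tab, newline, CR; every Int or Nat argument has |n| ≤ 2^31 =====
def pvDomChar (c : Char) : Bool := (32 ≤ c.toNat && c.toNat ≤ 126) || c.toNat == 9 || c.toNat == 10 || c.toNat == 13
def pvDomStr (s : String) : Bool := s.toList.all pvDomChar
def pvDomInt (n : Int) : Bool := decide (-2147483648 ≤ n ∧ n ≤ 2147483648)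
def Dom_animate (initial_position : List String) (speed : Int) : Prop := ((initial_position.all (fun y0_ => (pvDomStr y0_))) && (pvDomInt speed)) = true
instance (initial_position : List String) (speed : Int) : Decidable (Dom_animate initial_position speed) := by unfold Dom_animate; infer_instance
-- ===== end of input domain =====

-- B replaces A's 2D list-of-lists state simulation by a per-step closed-form occupancy from the source positions (objective: simpler).

-- ===== PORT A =====
-- 'output += "X"' is ported on the char-list side (exact); '"R" in sub_arr' is Python list membership.
def particle_string (input_arr : List (List String)) : String :=
  String.ofList (input_arr.foldl
    (fun output sub_arr => if "R" ∈ sub_arr ∨ "L" ∈ sub_arr then output ++ ['X'] else output ++ ['.'])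
    [])

-- next_position[idx].append(v): exact wherever Python does not raise IndexError (raising inputs lie outside Pre_animate)
def appendAt (xs : List (List String)) (idx : Int) (v : String) : List (List String) :=
  PySem.List.pySetD xs idx (PySem.List.pyGetD xs idx [] ++ [v])

def animateStep (n : Nat) (speed : Int) (current_position : List (List String)) : List (List String) :=
  (PySem.List.enumerate current_position 0).foldl
    (fun next_position p =>
      p.2.foldl
        (fun next_position particle =>
          if particle = "R" then
            (if p.1 + speed ≤ (n : Int) - 1 then appendAt next_position (p.1 + speed) "R" else next_position)
          else if particle = "L" then
            (if 0 ≤ p.1 - speed then appendAt next_position (p.1 - speed) "L" else next_position)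
          else next_position)
        next_position)
    (List.replicate n [])

-- A's while-loop; the fuel only makes it total: length+1 iterations suffice on every input Pre_animate admits
def animateLoop (n : Nat) (speed : Int) : Nat → List String → List (List String) → List String
  | 0, steps, _ => steps
  | fuel + 1, steps, current_position =>
    let particle_str := particle_string current_position
    if PySem.Str.isIn "X" particle_str then
      animateLoop n speed fuel (steps ++ [particle_str]) (animateStep n speed current_position)
    else
      steps ++ [particle_str]

def animate (initial_position : List String) (speed : Int) : List String :=
  animateLoop initial_position.length speed (initial_position.length + 1) []
    (initial_position.map (fun direction => [direction]))

-- ===== PORT B =====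
def rsOf (initial_position : List String) : List Int :=
  (PySem.List.enumerate initial_position 0).filterMap (fun p => if p.2 = "R" then some p.1 else none)

def lsOf (initial_position : List String) : List Int :=
  (PySem.List.enumerate initial_position 0).filterMap (fun p => if p.2 = "L" then some p.1 else none)

def altOcc (n : Nat) (speed : Int) (rs ls : List Int) (t : Nat) : PySem.Set Int :=
  ls.foldl
    (fun occupied i =>
      if 0 ≤ i - (t : Int) * speed ∧ i - (t : Int) * speed ≤ (n : Int) - 1 then
        PySem.Set.add occupied (i - (t : Int) * speed) else occupied)
    (rs.foldl
      (fun occupied i =>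
        if 0 ≤ i + (t : Int) * speed ∧ i + (t : Int) * speed ≤ (n : Int) - 1 then
          PySem.Set.add occupied (i + (t : Int) * speed) else occupied)
      PySem.Set.empty)

-- B's while-loop; the fuel only makes it total: length+1 iterations suffice on every input Pre_animate admits
def altLoop (n : Nat) (speed : Int) (rs ls : List Int) : Nat → List String → Nat → List String
  | 0, steps, _ => steps
  | fuel + 1, steps, t =>
    let s := String.ofList ((List.range n).map (fun j : Nat => if (j : Int) ∈ altOcc n speed rs ls t then 'X' else '.'))
    if PySem.Str.isIn "X" s then altLoop n speed rs ls fuel (steps ++ [s]) (t + 1) else steps ++ [s]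

def animate_alt (initial_position : List String) (speed : Int) : List String :=
  altLoop initial_position.length speed (rsOf initial_position) (lsOf initial_position)
    (initial_position.length + 1) [] 0

-- ===== PRECONDITION & SPEC =====
-- Pre_animate is exactly where Python A returns: with speed ≤ 0 and a particle ("R"/"L" element) present,
-- A loops forever or raises IndexError, so those inputs are excluded.
def Pre_animate (initial_position : List String) (speed : Int) : Prop :=
  1 ≤ speed ∨ ∀ d ∈ initial_position, d ≠ "R" ∧ d ≠ "L"
instance (initial_position : List String) (speed : Int) : Decidable (Pre_animate initial_position speed) := by
  unfold Pre_animate; infer_instance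

def pvWitness_animate : List String × Int := (["R", "x", "L"], 1)

-- For speed ≤ -1 with an "L" present, or an "R" present and the length < -speed, A eventually raises
-- IndexError (out-of-range append index); B returns the finite list of steps until the chamber is empty.
def Raises_animate (initial_position : List String) (speed : Int) : Prop :=
  speed ≤ -1 ∧ ("L" ∈ initial_position ∨ ("R" ∈ initial_position ∧ (initial_position.length : Int) < -speed))
instance (initial_position : List String) (speed : Int) : Decidable (Raises_animate initial_position speed) := by
  unfold Raises_animate; infer_instance

def pvRaiseWitness_animate : List String × Int := (["L"], -1)
def pvRaiseWitnessOut_animate : List String := ["X", "."]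

def Spec_animate (initial_position : List String) (speed : Int) (out : List String) : Prop :=
  out = animate_alt initial_position speed
instance (initial_position : List String) (speed : Int) (out : List String) : Decidable (Spec_animate initial_position speed out) := by
  unfold Spec_animate; infer_instance

-- ===== CLAIM (what is proved, stated in full; the proofs are below) =====
def Claim_equal_animate : Prop := ∀ (initial_position : List String) (speed : Int), Dom_animate initial_position speed → Pre_animate initial_position speed → Spec_animate initial_position speed (animate initial_position speed)

def Claim_raises_animate : Prop := (∀ (initial_position : List String) (speed : Int), Dom_animate initial_position speed → Raises_animate initial_position speed → ¬ Pre_animate initial_position speed) ∧ (Dom_animate (pvRaiseWitness_animate.1) (pvRaiseWitness_animate.2) ∧ Raises_animate (pvRaiseWitness_animate.1) (pvRaiseWitness_animate.2) ∧ animate_alt (pvRaiseWitness_animate.1) (pvRaiseWitness_animate.2) = pvRaiseWitnessOut_animate)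

-- ===== LEMMAS AND PROOFS =====

-- occupancy spec: is cell j occupied (by an R- resp. L-particle) at time t?
def occR (ip : List String) (speed : Int) (t : Nat) (j : Nat) : Bool :=
  (List.range ip.length).any (fun i => ip.getD i "" == "R" && (j : Int) == (i : Int) + (t : Int) * speed)

def occL (ip : List String) (speed : Int) (t : Nat) (j : Nat) : Bool :=
  (List.range ip.length).any (fun i => ip.getD i "" == "L" && (j : Int) == (i : Int) - (t : Int) * speed)

def cellSpec (ip : List String) (speed : Int) (t : Nat) (j : Nat) : List String :=
  (if occR ip speed t j then ["R"] else []) ++ (if occL ip speed t j then ["L"] else [])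

def stateSpec (ip : List String) (speed : Int) : Nat → List (List String)
  | 0 => ip.map (fun d => [d])
  | t + 1 => (List.range ip.length).map (cellSpec ip speed (t + 1))

def strSpec (ip : List String) (speed : Int) (t : Nat) : String :=
  String.ofList ((List.range ip.length).map
    (fun j => if occR ip speed t j || occL ip speed t j then 'X' else '.'))

theorem occR_iff (ip : List String) (speed : Int) (t : Nat) (j : Nat) :
    occR ip speed t j = true ↔
      ∃ i : Nat, i < ip.length ∧ ip.getD i "" = "R" ∧ (j : Int) = (i : Int) + (t : Int) * speed := by
  simp [occR, List.any_eq_true, List.mem_range]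

theorem occL_iff (ip : List String) (speed : Int) (t : Nat) (j : Nat) :
    occL ip speed t j = true ↔
      ∃ i : Nat, i < ip.length ∧ ip.getD i "" = "L" ∧ (j : Int) = (i : Int) - (t : Int) * speed := by
  simp [occL, List.any_eq_true, List.mem_range]

theorem occR_zero (ip : List String) (speed : Int) (j : Nat) (hj : j < ip.length) :
    occR ip speed 0 j = (ip.getD j "" == "R") := by
  by_cases h : ip.getD j "" = "R"
  · rw [show (ip.getD j "" == "R") = true by simp only [beq_iff_eq]; exact h]
    exact (occR_iff ip speed 0 j).mpr ⟨j, hj, h, by push_cast; ring⟩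
  · rw [show (ip.getD j "" == "R") = false by rw [beq_eq_false_iff_ne]; exact h]
    refine Bool.eq_false_iff.mpr (fun hc => ?_)
    rcases (occR_iff ip speed 0 j).mp hc with ⟨i, hi, hR, he⟩
    have hij : i = j := by simp at he; omega
    exact h (hij ▸ hR)

theorem occL_zero (ip : List String) (speed : Int) (j : Nat) (hj : j < ip.length) :
    occL ip speed 0 j = (ip.getD j "" == "L") := by
  by_cases h : ip.getD j "" = "L"
  · rw [show (ip.getD j "" == "L") = true by simp only [beq_iff_eq]; exact h]
    exact (occL_iff ip speed 0 j).mpr ⟨j, hj, h, by push_cast; ring⟩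
  · rw [show (ip.getD j "" == "L") = false by rw [beq_eq_false_iff_ne]; exact h]
    refine Bool.eq_false_iff.mpr (fun hc => ?_)
    rcases (occL_iff ip speed 0 j).mp hc with ⟨i, hi, hR, he⟩
    have hij : i = j := by simp at he; omega
    exact h (hij ▸ hR)

theorem enum_range {α : Type} (ip : List α) (d : α) :
    PySem.List.enumerate ip 0 = (List.range ip.length).map (fun k : Nat => ((k : Int), ip.getD k d)) := by
  apply List.ext_getElem
  · simp [PySem.List.length_enumerate]
  · intro k h1 h2
    simp [PySem.List.length_enumerate] at h1
    simp [PySem.List.getElem_enumerate, List.getD_eq_getElem?_getD, List.getElem?_eq_getElem h1]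

theorem ps_fold (arr : List (List String)) (acc : List Char) :
    arr.foldl (fun output sub_arr => if "R" ∈ sub_arr ∨ "L" ∈ sub_arr then output ++ ['X'] else output ++ ['.']) acc
      = acc ++ arr.map (fun sub => if "R" ∈ sub ∨ "L" ∈ sub then 'X' else '.') := by
  induction arr generalizing acc with
  | nil => simp
  | cons h tl ih =>
    by_cases hh : "R" ∈ h ∨ "L" ∈ h <;> simp [hh, ih]

theorem ps_closed (arr : List (List String)) :
    particle_string arr =
      String.ofList (arr.map (fun sub => if "R" ∈ sub ∨ "L" ∈ sub then 'X' else '.')) := by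
  unfold particle_string
  rw [ps_fold]
  rfl

theorem particle_string_stateSpec (ip : List String) (speed : Int) (t : Nat) :
    particle_string (stateSpec ip speed t) = strSpec ip speed t := by
  rw [ps_closed]
  unfold strSpec
  refine congrArg String.ofList ?_
  cases t with
  | zero =>
    apply List.ext_getElem
    · simp [stateSpec]
    · intro k h1 h2
      simp only [stateSpec, List.length_map] at h1
      simp only [List.length_map, List.length_range] at h2
      simp [stateSpec, occR_zero ip speed k h1, occL_zero ip speed k h1,
        List.getD_eq_getElem?_getD, List.getElem?_eq_getElem h1]
      exact if_congr (or_congr eq_comm eq_comm) rfl rfl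
  | succ t =>
    rw [stateSpec, List.map_map]
    refine List.map_congr_left (fun j hj => ?_)
    simp only [List.mem_range] at hj
    simp only [Function.comp, cellSpec]
    by_cases hR : occR ip speed (t + 1) j = true <;>
      by_cases hL : occL ip speed (t + 1) j = true <;> simp [hR, hL]

theorem mem_foldl_add_if {P : Int → Prop} [DecidablePred P] (g : Int → Int) (l : List Int)
    (s0 : PySem.Set Int) (y : Int) :
    (y ∈ l.foldl (fun occ i => if P i then PySem.Set.add occ (g i) else occ) s0) ↔
      y ∈ s0 ∨ ∃ i ∈ l, P i ∧ y = g i := by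
  induction l generalizing s0 with
  | nil => simp
  | cons h tl ih =>
    rw [List.foldl_cons]
    by_cases hh : P h
    · rw [if_pos hh, ih]
      simp only [PySem.Set.mem_add, List.mem_cons]
      constructor
      · rintro ((hy | hy) | ⟨i, hi, hPi, hy⟩)
        · exact Or.inl hy
        · exact Or.inr ⟨h, Or.inl rfl, hh, hy⟩
        · exact Or.inr ⟨i, Or.inr hi, hPi, hy⟩
      · rintro (hy | ⟨i, hi | hi, hPi, hy⟩)
        · exact Or.inl (Or.inl hy)
        · subst hi; exact Or.inl (Or.inr hy)
        · exact Or.inr ⟨i, hi, hPi, hy⟩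
    · rw [if_neg hh, ih]
      simp only [List.mem_cons]
      constructor
      · rintro (hy | ⟨i, hi, hPi, hy⟩)
        · exact Or.inl hy
        · exact Or.inr ⟨i, Or.inr hi, hPi, hy⟩
      · rintro (hy | ⟨i, hi | hi, hPi, hy⟩)
        · exact Or.inl hy
        · subst hi; exact absurd hPi hh
        · exact Or.inr ⟨i, hi, hPi, hy⟩

theorem mem_rsOf (ip : List String) (x : Int) :
    x ∈ rsOf ip ↔ ∃ k : Nat, k < ip.length ∧ ip.getD k "" = "R" ∧ x = (k : Int) := by
  unfold rsOf
  rw [enum_range ip "", List.filterMap_map]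
  simp only [List.mem_filterMap, List.mem_range, Function.comp]
  constructor
  · rintro ⟨k, hk, he⟩
    split at he
    · rename_i hcond
      exact ⟨k, hk, hcond, (Option.some.inj he).symm⟩
    · exact absurd he (by simp)
  · rintro ⟨k, hk, hR, he⟩
    exact ⟨k, hk, by rw [if_pos hR, he]⟩

theorem mem_lsOf (ip : List String) (x : Int) :
    x ∈ lsOf ip ↔ ∃ k : Nat, k < ip.length ∧ ip.getD k "" = "L" ∧ x = (k : Int) := by
  unfold lsOf
  rw [enum_range ip "", List.filterMap_map]
  simp only [List.mem_filterMap, List.mem_range, Function.comp]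
  constructor
  · rintro ⟨k, hk, he⟩
    split at he
    · rename_i hcond
      exact ⟨k, hk, hcond, (Option.some.inj he).symm⟩
    · exact absurd he (by simp)
  · rintro ⟨k, hk, hR, he⟩
    exact ⟨k, hk, by rw [if_pos hR, he]⟩

theorem mem_altOcc (ip : List String) (speed : Int) (t : Nat) (j : Nat) (hj : j < ip.length) :
    ((j : Int) ∈ altOcc ip.length speed (rsOf ip) (lsOf ip) t) ↔
      (occR ip speed t j || occL ip speed t j) = true := by
  unfold altOcc
  rw [mem_foldl_add_if, mem_foldl_add_if]
  have hempty : ¬ ((j : Int) ∈ (PySem.Set.empty : PySem.Set Int)) := by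
    simp [PySem.Set.empty]
  simp only [Bool.or_eq_true, occR_iff, occL_iff]
  constructor
  · rintro ((h | ⟨i, hi, ⟨hb1, hb2⟩, he⟩) | ⟨i, hi, ⟨hb1, hb2⟩, he⟩)
    · exact absurd h hempty
    · rcases (mem_rsOf ip i).mp hi with ⟨k, hk, hR, hx⟩
      exact Or.inl ⟨k, hk, hR, by omega⟩
    · rcases (mem_lsOf ip i).mp hi with ⟨k, hk, hL, hx⟩
      exact Or.inr ⟨k, hk, hL, by omega⟩
  · have hjn : (j : Int) < (ip.length : Int) := by exact_mod_cast hj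
    rintro (⟨i, hi, hR, he⟩ | ⟨i, hi, hL, he⟩)
    · exact Or.inl (Or.inr ⟨(i : Int), (mem_rsOf ip _).mpr ⟨i, hi, hR, rfl⟩, ⟨by omega, by omega⟩, he⟩)
    · exact Or.inr ⟨(i : Int), (mem_lsOf ip _).mpr ⟨i, hi, hL, rfl⟩, ⟨by omega, by omega⟩, he⟩

theorem altStr_eq_strSpec (ip : List String) (speed : Int) (t : Nat) :
    String.ofList ((List.range ip.length).map
      (fun j : Nat => if (j : Int) ∈ altOcc ip.length speed (rsOf ip) (lsOf ip) t then 'X' else '.')) =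
    strSpec ip speed t := by
  unfold strSpec
  refine congrArg String.ofList (List.map_congr_left (fun j hj => ?_))
  simp only [List.mem_range] at hj
  rw [if_congr (mem_altOcc ip speed t j hj) rfl rfl]



-- ===== the step lemma: one A-iteration maps the time-t spec state to the time-(t+1) spec state =====

theorem length_appendAt (xs : List (List String)) (idx : Int) (v : String) :
    (appendAt xs idx v).length = xs.length := by
  unfold appendAt; exact PySem.List.length_pySetD ..

theorem getD_appendAt (xs : List (List String)) (idx : Int) (v : String)
    (h0 : 0 ≤ idx) (h1 : idx < (xs.length : Int)) (j : Nat) (hj : j < xs.length) :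
    (appendAt xs idx v).getD j [] =
      if idx = (j : Int) then xs.getD j [] ++ [v] else xs.getD j [] := by
  unfold appendAt
  rw [PySem.List.pySetD_of_nonneg xs _ h0, PySem.List.pyGetD_eq_getElem xs [] h0 h1]
  by_cases h : idx = (j : Int)
  · rw [if_pos h]
    have hij : idx.toNat = j := by omega
    simp [hij, List.getD_eq_getElem?_getD, hj]
  · rw [if_neg h]
    have hij : idx.toNat ≠ j := by omega
    simp [List.getD_eq_getElem?_getD, hij]

def applyActs (next : List (List String)) (acts : List (Int × String)) : List (List String) :=
  acts.foldl (fun nx a => appendAt nx a.1 a.2) next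

theorem length_applyActs (acts : List (Int × String)) :
    ∀ next : List (List String), (applyActs next acts).length = next.length := by
  induction acts with
  | nil => intro next; rfl
  | cons a acts ih =>
    intro next
    rw [show applyActs next (a :: acts) = applyActs (appendAt next a.1 a.2) acts from rfl, ih,
      length_appendAt]

theorem getD_applyActs (acts : List (Int × String)) :
    ∀ next : List (List String),
      (∀ a ∈ acts, 0 ≤ a.1 ∧ a.1 < (next.length : Int)) → ∀ j : Nat, j < next.length →
      (applyActs next acts).getD j [] =
        next.getD j [] ++ acts.filterMap (fun a => if a.1 = (j : Int) then some a.2 else none) := by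
  induction acts with
  | nil => intro next _ j _; simp [applyActs]
  | cons a acts ih =>
    intro next hb j hj
    have ha := hb a (List.mem_cons_self ..)
    rw [show applyActs next (a :: acts) = applyActs (appendAt next a.1 a.2) acts from rfl]
    rw [ih (appendAt next a.1 a.2)
      (by rw [length_appendAt]; exact fun x hx => hb x (List.mem_cons_of_mem a hx)) j
      (by rw [length_appendAt]; exact hj)]
    rw [getD_appendAt next a.1 a.2 ha.1 ha.2 j hj, List.filterMap_cons]
    by_cases h : a.1 = (j : Int)
    · rw [if_pos h]; simp [h]
    · rw [if_neg h]; simp [h]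

def actsOf (n : Nat) (speed : Int) (cur : List (List String)) : List (Int × String) :=
  (PySem.List.enumerate cur 0).flatMap (fun p =>
    p.2.flatMap (fun particle =>
      if particle = "R" then (if p.1 + speed ≤ (n : Int) - 1 then [(p.1 + speed, "R")] else [])
      else if particle = "L" then (if 0 ≤ p.1 - speed then [(p.1 - speed, "L")] else [])
      else []))

theorem applyActs_append (acts1 acts2 : List (Int × String)) (next : List (List String)) :
    applyActs next (acts1 ++ acts2) = applyActs (applyActs next acts1) acts2 :=
  List.foldl_append ..

theorem applyActs_flatMap {β : Type} (l : List β) (g : β → List (Int × String)) :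
    ∀ next, applyActs next (l.flatMap g) = l.foldl (fun nx x => applyActs nx (g x)) next := by
  induction l with
  | nil => intro next; rfl
  | cons x l ih => intro next; rw [List.flatMap_cons, applyActs_append, ih, List.foldl_cons]

theorem step_eq (n : Nat) (speed : Int) (cur : List (List String)) :
    animateStep n speed cur = applyActs (List.replicate n []) (actsOf n speed cur) := by
  unfold animateStep actsOf
  rw [applyActs_flatMap]
  congr 1
  funext next_position p
  rw [applyActs_flatMap]
  congr 1
  funext nx particle
  by_cases h1 : particle = "R"
  · rw [if_pos h1, if_pos h1]
    by_cases h2 : p.1 + speed ≤ (n : Int) - 1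
    · rw [if_pos h2, if_pos h2]; rfl
    · rw [if_neg h2, if_neg h2]; rfl
  · rw [if_neg h1, if_neg h1]
    by_cases h3 : particle = "L"
    · rw [if_pos h3, if_pos h3]
      by_cases h2 : 0 ≤ p.1 - speed
      · rw [if_pos h2, if_pos h2]; rfl
      · rw [if_neg h2, if_neg h2]; rfl
    · rw [if_neg h3, if_neg h3]; rfl

def canonActs (ip : List String) (speed : Int) (t : Nat) (i : Nat) : List (Int × String) :=
  (if occR ip speed t i = true ∧ (i : Int) + speed ≤ (ip.length : Int) - 1 then
    [((i : Int) + speed, "R")] else []) ++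
  (if occL ip speed t i = true ∧ 0 ≤ (i : Int) - speed then
    [((i : Int) - speed, "L")] else [])

theorem actsOf_stateSpec (ip : List String) (speed : Int) (t : Nat) :
    actsOf ip.length speed (stateSpec ip speed t) =
      (List.range ip.length).flatMap (canonActs ip speed t) := by
  unfold actsOf
  cases t with
  | zero =>
    rw [show stateSpec ip speed 0 = ip.map (fun d => [d]) from rfl,
      enum_range (ip.map (fun d => [d])) [], List.length_map, List.flatMap_map]
    refine List.flatMap_congr (fun k hk => ?_)
    rw [List.mem_range] at hk
    have hcell : (ip.map (fun d => [d])).getD k [] = [ip.getD k ""] := by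
      rw [List.getD_eq_getElem _ _ (by simpa using hk), List.getElem_map,
        List.getD_eq_getElem _ _ hk]
    rw [hcell]
    simp only [List.flatMap_cons, List.flatMap_nil, List.append_nil]
    unfold canonActs
    rw [occR_zero ip speed k hk, occL_zero ip speed k hk]
    by_cases hR : ip.getD k "" = "R" <;> by_cases hL : ip.getD k "" = "L"
    · rw [hR] at hL; exact absurd hL (by decide)
    · simp only [List.getD_eq_getElem?_getD] at hR; simp [hR]
    · simp only [List.getD_eq_getElem?_getD] at hL; simp [hL]
    · simp only [List.getD_eq_getElem?_getD] at hR hL; simp [hR, hL]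
  | succ t =>
    rw [show stateSpec ip speed (t + 1) = (List.range ip.length).map (cellSpec ip speed (t + 1))
        from rfl,
      enum_range _ [], List.length_map, List.length_range, List.flatMap_map]
    refine List.flatMap_congr (fun k hk => ?_)
    rw [List.mem_range] at hk
    have hcell : ((List.range ip.length).map (cellSpec ip speed (t + 1))).getD k [] =
        cellSpec ip speed (t + 1) k := by
      rw [List.getD_eq_getElem _ _ (by simpa using hk), List.getElem_map, List.getElem_range]
    rw [hcell]
    unfold cellSpec canonActs
    rw [List.flatMap_append]
    by_cases ha : occR ip speed (t + 1) k = true <;>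
      by_cases hb : occL ip speed (t + 1) k = true <;> simp [ha, hb]

theorem flatMap_range_support {α : Type} (a b : Nat) (hab : a < b) :
    ∀ (n : Nat) (f : Nat → List α), (∀ i, i < n → i ≠ a → i ≠ b → f i = []) →
      (List.range n).flatMap f = (if a < n then f a else []) ++ (if b < n then f b else []) := by
  intro n
  induction n with
  | zero => intro f _; simp
  | succ n ih =>
    intro f hf
    rw [List.range_succ, List.flatMap_append,
      ih f (fun i h1 h2 h3 => hf i (Nat.lt_succ_of_lt h1) h2 h3)]
    simp only [List.flatMap_cons, List.flatMap_nil, List.append_nil]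
    by_cases han : n = a
    · subst han
      rw [if_neg (lt_irrefl n), if_pos (Nat.lt_succ_self n), if_neg (by omega), if_neg (by omega)]
      simp
    · by_cases hbn : n = b
      · subst hbn
        rw [if_neg (lt_irrefl n), if_pos (Nat.lt_succ_self n),
          if_congr (show a < n + 1 ↔ a < n by omega) rfl rfl]
        simp
      · have hfn : f n = [] := hf n (Nat.lt_succ_self n) han hbn
        rw [hfn, List.append_nil, if_congr (show a < n + 1 ↔ a < n by omega) rfl rfl,
          if_congr (show b < n + 1 ↔ b < n by omega) rfl rfl]

theorem canon_filter (ip : List String) (speed : Int) (t : Nat) (i j : Nat) :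
    (canonActs ip speed t i).filterMap (fun a => if a.1 = (j : Int) then some a.2 else none) =
      (if (occR ip speed t i = true ∧ (i : Int) + speed ≤ (ip.length : Int) - 1) ∧
          (i : Int) + speed = (j : Int) then ["R"] else []) ++
      (if (occL ip speed t i = true ∧ 0 ≤ (i : Int) - speed) ∧
          (i : Int) - speed = (j : Int) then ["L"] else []) := by
  unfold canonActs
  rw [List.filterMap_append]
  congr 1
  · by_cases hc : occR ip speed t i = true ∧ (i : Int) + speed ≤ (ip.length : Int) - 1 <;>
      by_cases he : (i : Int) + speed = (j : Int) <;> simp [hc, he] <;>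
      first
      | (split_ifs <;> simp)
      | (intro a b _ _ ha _; rw [ha]; exact he)
  · by_cases hc : occL ip speed t i = true ∧ 0 ≤ (i : Int) - speed <;>
      by_cases he : (i : Int) - speed = (j : Int) <;> simp [hc, he] <;>
      first
      | (split_ifs <;> simp)
      | (intro a b _ _ ha _; rw [ha]; exact he)

theorem occR_succ (ip : List String) (speed : Int) (t j a : Nat)
    (hA : (a : Int) = (j : Int) - speed) :
    occR ip speed (t + 1) j = occR ip speed t a := by
  rw [Bool.eq_iff_iff, occR_iff, occR_iff]
  constructor
  · rintro ⟨i, hi, hRi, he⟩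
    refine ⟨i, hi, hRi, ?_⟩
    push_cast at he ⊢
    linarith
  · rintro ⟨i, hi, hRi, he⟩
    refine ⟨i, hi, hRi, ?_⟩
    push_cast at he ⊢
    linarith

theorem occL_succ (ip : List String) (speed : Int) (t j b : Nat)
    (hB : (b : Int) = (j : Int) + speed) :
    occL ip speed (t + 1) j = occL ip speed t b := by
  rw [Bool.eq_iff_iff, occL_iff, occL_iff]
  constructor
  · rintro ⟨i, hi, hLi, he⟩
    refine ⟨i, hi, hLi, ?_⟩
    push_cast at he ⊢
    linarith
  · rintro ⟨i, hi, hLi, he⟩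
    refine ⟨i, hi, hLi, ?_⟩
    push_cast at he ⊢
    linarith

theorem occR_far (ip : List String) (speed : Int) (hs : 1 ≤ speed) (t j : Nat)
    (hpre : ¬ 0 ≤ (j : Int) - speed) :
    occR ip speed (t + 1) j = false := by
  refine Bool.eq_false_iff.mpr (fun hc => ?_)
  rcases (occR_iff ip speed (t + 1) j).mp hc with ⟨i, hi, _, he⟩
  push_cast at he
  have hts : 0 ≤ (t : Int) * speed := mul_nonneg (by positivity) (by omega)
  have hi0 : (0 : Int) ≤ (i : Int) := by positivity
  nlinarith

theorem occL_far (ip : List String) (speed : Int) (hs : 1 ≤ speed) (t b : Nat)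
    (hbn : ip.length ≤ b) :
    occL ip speed t b = false := by
  refine Bool.eq_false_iff.mpr (fun hc => ?_)
  rcases (occL_iff ip speed t b).mp hc with ⟨i, hi, _, he⟩
  have hts : 0 ≤ (t : Int) * speed := mul_nonneg (by positivity) (by omega)
  have h1 : (i : Int) < (ip.length : Int) := by exact_mod_cast hi
  have h2 : (ip.length : Int) ≤ (b : Int) := by exact_mod_cast hbn
  linarith

theorem animateStep_stateSpec (ip : List String) (speed : Int) (hs : 1 ≤ speed) (t : Nat) :
    animateStep ip.length speed (stateSpec ip speed t) = stateSpec ip speed (t + 1) := by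
  rw [step_eq, actsOf_stateSpec]
  have hlenA : (applyActs (List.replicate ip.length [])
      ((List.range ip.length).flatMap (canonActs ip speed t))).length = ip.length := by
    rw [length_applyActs, List.length_replicate]
  have hlenB : (stateSpec ip speed (t + 1)).length = ip.length := by
    simp [stateSpec]
  apply List.ext_getElem (by rw [hlenA, hlenB])
  intro j h1 h2
  have hj : j < ip.length := by rwa [hlenA] at h1
  rw [← List.getD_eq_getElem _ [] h1, ← List.getD_eq_getElem _ [] h2]
  have hRHS : (stateSpec ip speed (t + 1)).getD j [] = cellSpec ip speed (t + 1) j := by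
    rw [show stateSpec ip speed (t + 1) = (List.range ip.length).map (cellSpec ip speed (t + 1))
        from rfl,
      List.getD_eq_getElem _ _ (by simpa using hj), List.getElem_map, List.getElem_range]
  rw [hRHS]
  have hbound : ∀ a ∈ (List.range ip.length).flatMap (canonActs ip speed t),
      0 ≤ a.1 ∧ a.1 < (((List.replicate ip.length ([] : List String)).length : Nat) : Int) := by
    intro a ha
    rw [List.mem_flatMap] at ha
    rcases ha with ⟨i, hi, ha⟩
    rw [List.mem_range] at hi
    rw [List.length_replicate]
    have hiN : (i : Int) < (ip.length : Int) := by exact_mod_cast hi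
    unfold canonActs at ha
    rw [List.mem_append] at ha
    rcases ha with ha | ha
    · split at ha
      · rename_i hc
        rw [List.mem_singleton] at ha
        subst ha
        exact ⟨by omega, by simpa using hc.2⟩
      · exact absurd ha (List.not_mem_nil)
    · split at ha
      · rename_i hc
        rw [List.mem_singleton] at ha
        subst ha
        exact ⟨by simpa using hc.2, by omega⟩
      · exact absurd ha (List.not_mem_nil)
  rw [getD_applyActs _ _ hbound j (by rw [List.length_replicate]; exact hj)]
  have hrep : (List.replicate ip.length ([] : List String)).getD j [] = [] := by
    simp [List.getD_eq_getElem?_getD, hj]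
  rw [hrep, List.nil_append, List.filterMap_flatMap]
  have hcong := List.flatMap_congr (l := List.range ip.length)
    (fun i _ => canon_filter ip speed t i j)
  rw [hcong]
  have hjI : (j : Int) < (ip.length : Int) := by exact_mod_cast hj
  by_cases hpre : 0 ≤ (j : Int) - speed
  · -- the R-source cell a = j - speed exists as a Nat index
    set a : Nat := ((j : Int) - speed).toNat with hadef
    have hA : (a : Int) = (j : Int) - speed := Int.toNat_of_nonneg hpre
    set b : Nat := j + speed.toNat with hbdef
    have hB : (b : Int) = (j : Int) + speed := by
      have : ((speed.toNat : Nat) : Int) = speed := Int.toNat_of_nonneg (by omega)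
      omega
    have hab : a < b := by omega
    rw [flatMap_range_support a b hab ip.length _ (fun i hi hia hib => ?_)]
    · have haN : a < ip.length := by omega
      rw [if_pos haN]
      have e1 : ((occR ip speed t a = true ∧ (a : Int) + speed ≤ (ip.length : Int) - 1) ∧
          (a : Int) + speed = (j : Int)) ↔ occR ip speed t a = true :=
        ⟨fun h => h.1.1, fun h => ⟨⟨h, by omega⟩, by omega⟩⟩
      have e2 : ¬ ((occL ip speed t a = true ∧ 0 ≤ (a : Int) - speed) ∧
          (a : Int) - speed = (j : Int)) := by
        rintro ⟨_, h⟩; omega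
      have e3 : ¬ ((occR ip speed t b = true ∧ (b : Int) + speed ≤ (ip.length : Int) - 1) ∧
          (b : Int) + speed = (j : Int)) := by
        rintro ⟨_, h⟩; omega
      have e4 : ((occL ip speed t b = true ∧ 0 ≤ (b : Int) - speed) ∧
          (b : Int) - speed = (j : Int)) ↔ occL ip speed t b = true :=
        ⟨fun h => h.1.1, fun h => ⟨⟨h, by omega⟩, by omega⟩⟩
      rw [if_congr e1 rfl rfl, if_neg e2, List.append_nil]
      unfold cellSpec
      rw [occR_succ ip speed t j a hA, occL_succ ip speed t j b hB]
      by_cases hbN : b < ip.length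
      · rw [if_pos hbN, if_neg e3, if_congr e4 rfl rfl]
        simp
      · rw [if_neg hbN, List.append_nil, occL_far ip speed hs t b (by omega)]
        simp
    · -- i is neither a nor b: both action filters are empty
      have g1 : ¬ ((occR ip speed t i = true ∧ (i : Int) + speed ≤ (ip.length : Int) - 1) ∧
          (i : Int) + speed = (j : Int)) := by
        rintro ⟨_, h⟩
        exact hia (by omega)
      have g2 : ¬ ((occL ip speed t i = true ∧ 0 ≤ (i : Int) - speed) ∧
          (i : Int) - speed = (j : Int)) := by
        rintro ⟨_, h⟩
        exact hib (by omega)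
      rw [if_neg g1, if_neg g2, List.append_nil]
  · -- no R-source cell: only the L-source cell b = j + speed can contribute
    set b : Nat := j + speed.toNat with hbdef
    have hB : (b : Int) = (j : Int) + speed := by
      have : ((speed.toNat : Nat) : Int) = speed := Int.toNat_of_nonneg (by omega)
      omega
    rw [flatMap_range_support b (ip.length + b + 1) (by omega) ip.length _
      (fun i hi hib hibig => ?_)]
    · rw [if_neg (by omega : ¬ ip.length + b + 1 < ip.length), List.append_nil]
      have e3 : ¬ ((occR ip speed t b = true ∧ (b : Int) + speed ≤ (ip.length : Int) - 1) ∧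
          (b : Int) + speed = (j : Int)) := by
        rintro ⟨_, h⟩; omega
      have e4 : ((occL ip speed t b = true ∧ 0 ≤ (b : Int) - speed) ∧
          (b : Int) - speed = (j : Int)) ↔ occL ip speed t b = true :=
        ⟨fun h => h.1.1, fun h => ⟨⟨h, by omega⟩, by omega⟩⟩
      unfold cellSpec
      rw [occR_far ip speed hs t j hpre, occL_succ ip speed t j b hB]
      by_cases hbN : b < ip.length
      · rw [if_pos hbN, if_neg e3, if_congr e4 rfl rfl]
        simp
      · rw [if_neg hbN, occL_far ip speed hs t b (by omega)]
        simp
    · have g1 : ¬ ((occR ip speed t i = true ∧ (i : Int) + speed ≤ (ip.length : Int) - 1) ∧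
          (i : Int) + speed = (j : Int)) := by
        rintro ⟨hc, h⟩
        have hi0 : (0 : Int) ≤ (i : Int) := by positivity
        omega
      have g2 : ¬ ((occL ip speed t i = true ∧ 0 ≤ (i : Int) - speed) ∧
          (i : Int) - speed = (j : Int)) := by
        rintro ⟨_, h⟩
        exact hib (by omega)
      rw [if_neg g1, if_neg g2, List.append_nil]

theorem loop_eq (ip : List String) (speed : Int) (hs : 1 ≤ speed) :
    ∀ (fuel : Nat) (steps : List String) (t : Nat),
      animateLoop ip.length speed fuel steps (stateSpec ip speed t) =
      altLoop ip.length speed (rsOf ip) (lsOf ip) fuel steps t := by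
  intro fuel
  induction fuel with
  | zero => intro steps t; rfl
  | succ fuel ih =>
    intro steps t
    rw [animateLoop, altLoop]
    simp only [particle_string_stateSpec, altStr_eq_strSpec]
    by_cases h : PySem.Str.isIn "X" (strSpec ip speed t) = true
    · rw [if_pos h, if_pos h, animateStep_stateSpec ip speed hs t]
      exact ih (steps ++ [strSpec ip speed t]) (t + 1)
    · rw [if_neg h, if_neg h]

theorem occR_none (ip : List String) (speed : Int) (t : Nat)
    (hnp : ∀ d ∈ ip, d ≠ "R" ∧ d ≠ "L") (j : Nat) : occR ip speed t j = false := by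
  refine Bool.eq_false_iff.mpr (fun hc => ?_)
  rcases (occR_iff ip speed t j).mp hc with ⟨i, hi, hRi, _⟩
  rw [List.getD_eq_getElem ip "" hi] at hRi
  exact (hnp _ (List.getElem_mem hi)).1 hRi

theorem occL_none (ip : List String) (speed : Int) (t : Nat)
    (hnp : ∀ d ∈ ip, d ≠ "R" ∧ d ≠ "L") (j : Nat) : occL ip speed t j = false := by
  refine Bool.eq_false_iff.mpr (fun hc => ?_)
  rcases (occL_iff ip speed t j).mp hc with ⟨i, hi, hLi, _⟩
  rw [List.getD_eq_getElem ip "" hi] at hLi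
  exact (hnp _ (List.getElem_mem hi)).2 hLi

theorem noX_strSpec (ip : List String) (speed : Int) (t : Nat)
    (hnp : ∀ d ∈ ip, d ≠ "R" ∧ d ≠ "L") :
    PySem.Str.isIn "X" (strSpec ip speed t) = false := by
  refine Bool.eq_false_iff.mpr (fun hc => ?_)
  rw [PySem.Str.isIn_iff_infix] at hc
  have hx : 'X' ∈ (strSpec ip speed t).toList := by
    have : "X".toList = ['X'] := rfl
    rw [this] at hc
    exact (List.singleton_infix_iff 'X' _).mp hc
  unfold strSpec at hx
  simp only [String.toList_ofList, List.mem_map] at hx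
  rcases hx with ⟨j, _, hj⟩
  rw [occR_none ip speed t hnp j, occL_none ip speed t hnp j] at hj
  simp at hj

-- ===== VERDICT (by name: the statement is the Claim_ definition above) =====
theorem animate_spec : Claim_equal_animate := by
  intro ip speed _ hPre
  unfold Spec_animate animate animate_alt
  have h0 : ip.map (fun direction => [direction]) = stateSpec ip speed 0 := rfl
  rw [h0]
  rcases hPre with hs | hnp
  · exact loop_eq ip speed hs (ip.length + 1) [] 0
  · rw [animateLoop, altLoop]
    simp only [particle_string_stateSpec, altStr_eq_strSpec]
    rw [if_neg (by rw [noX_strSpec ip speed 0 hnp]; simp),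
        if_neg (by rw [noX_strSpec ip speed 0 hnp]; simp)]

@[simp] theorem animate_raises : Claim_raises_animate := by
  unfold Claim_raises_animate
  refine ⟨?_, by decide⟩
  rintro ip speed _ ⟨hneg, hp⟩ hPre
  rcases hPre with hs | hnp
  · omega
  · rcases hp with hL | hR
    · exact (hnp _ hL).2 rfl
    · exact (hnp _ hR.1).1 rfl
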